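-- pv_equiv track=rewrite | github.com/vevevedk/vvv-frontpage | backend/woocommerce/management/commands/validate_sync_completeness.py | has_paid_search_attribution
-- ===== SOURCE A (Python) =====
-- def has_paid_search_attribution(order_data):
--     """Check if order has paid search attribution"""
--     if 'meta_data' in order_data:
--         for meta_item in order_data['meta_data']:
--             if isinstance(meta_item, dict):
--                 key = meta_item.get('key', '')
--                 value = meta_item.get('value', '')
--
--                 if key == '_wc_order_attribution_utm_source' and value == 'google':
--                     # Check if source_type is utm
--                     for meta_item2 in order_data['meta_data']:
--                         if (isinstance(meta_item2, dict) and
--                             meta_item2.get('key') == '_wc_order_attribution_source_type' and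
--                             meta_item2.get('value') == 'utm'):
--                             return True
--     return False
-- ===== SOURCE B (Python) =====
-- def has_paid_search_attribution(order_data):
--     """Check if order has paid search attribution"""
--     if 'meta_data' not in order_data:
--         return False
--     values_by_key = {}
--     for meta_item in order_data['meta_data']:
--         if isinstance(meta_item, dict):
--             values_by_key.setdefault(meta_item.get('key', ''), []).append(meta_item.get('value', ''))
--     return ('google' in values_by_key.get('_wc_order_attribution_utm_source', [])
--             and 'utm' in values_by_key.get('_wc_order_attribution_source_type', []))
-- ===== Notes on version B (the rewrite author's own statement) =====
-- stated objective: simpler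
-- what changed: Replaces A's nested rescan of meta_data (inner loop re-run for every matching google item) with one grouping pass that indexes values by key, answered by two dict lookups.
import Mathlib
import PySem

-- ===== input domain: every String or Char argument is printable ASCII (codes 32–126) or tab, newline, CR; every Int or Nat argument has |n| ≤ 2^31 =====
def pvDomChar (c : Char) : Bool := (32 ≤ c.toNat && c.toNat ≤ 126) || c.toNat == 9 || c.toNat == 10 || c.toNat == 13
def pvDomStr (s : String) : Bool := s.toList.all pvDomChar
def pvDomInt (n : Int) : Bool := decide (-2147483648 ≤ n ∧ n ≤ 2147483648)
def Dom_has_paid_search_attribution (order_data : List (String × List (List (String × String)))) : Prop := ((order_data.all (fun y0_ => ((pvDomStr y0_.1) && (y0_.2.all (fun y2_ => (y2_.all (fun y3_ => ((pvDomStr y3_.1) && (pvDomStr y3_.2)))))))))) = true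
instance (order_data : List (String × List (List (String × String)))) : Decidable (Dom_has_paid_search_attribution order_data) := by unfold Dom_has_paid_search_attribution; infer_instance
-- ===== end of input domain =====

-- B replaces A's nested rescan of meta_data with one grouping pass (values indexed by key)
-- plus two lookups; simpler, same return value on every input.


-- ===== PORT A =====
-- inner loop: 'for meta_item2 in order_data['meta_data']: if … return True'
-- (the isinstance check is always true under the type convention: every item IS a dict)
def hpsAInner : List (List (String × String)) → Bool
  | [] => false
  | m :: rest =>
    if (PySem.Dict.mk m).get? "key" = some "_wc_order_attribution_source_type" ∧
       (PySem.Dict.mk m).get? "value" = some "utm" then true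
    else hpsAInner rest

-- outer loop over meta_data (carries the full list for the inner rescan)
def hpsAOuter (allItems : List (List (String × String))) : List (List (String × String)) → Bool
  | [] => false
  | m :: rest =>
    let key := (PySem.Dict.mk m).getD "key" ""
    let value := (PySem.Dict.mk m).getD "value" ""
    if key = "_wc_order_attribution_utm_source" ∧ value = "google" then
      if hpsAInner allItems then true else hpsAOuter allItems rest
    else hpsAOuter allItems rest

def has_paid_search_attribution (order_data : List (String × List (List (String × String)))) : Bool :=
  match (PySem.Dict.mk order_data).get? "meta_data" with
  | some items => hpsAOuter items items
  | none => false

-- ===== PORT B =====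
def has_paid_search_attribution_alt (order_data : List (String × List (List (String × String)))) : Bool :=
  match (PySem.Dict.mk order_data).get? "meta_data" with
  | none => false
  | some items =>
    -- values_by_key.setdefault(m.get('key',''), []).append(m.get('value','')) ≡ modify k [] (· ++ [v])
    let byKey := items.foldl
      (fun d m => d.modify ((PySem.Dict.mk m).getD "key" "") []
        (· ++ [(PySem.Dict.mk m).getD "value" ""]))
      (PySem.Dict.empty)
    (byKey.getD "_wc_order_attribution_utm_source" []).contains "google" &&
    (byKey.getD "_wc_order_attribution_source_type" []).contains "utm"

-- ===== PRECONDITION & SPEC =====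
def Spec_has_paid_search_attribution (order_data : List (String × List (List (String × String)))) (out : Bool) : Prop := out = has_paid_search_attribution_alt order_data
instance (order_data : List (String × List (List (String × String)))) (out : Bool) : Decidable (Spec_has_paid_search_attribution order_data out) := by unfold Spec_has_paid_search_attribution; infer_instance

-- ===== CLAIM (what is proved, stated in full; the proofs are below) =====
def Claim_equal_has_paid_search_attribution : Prop := ∀ (order_data : List (String × List (List (String × String)))), Dom_has_paid_search_attribution order_data → Spec_has_paid_search_attribution order_data (has_paid_search_attribution order_data)

-- ===== LEMMAS AND PROOFS =====

-- generalized invariant of B's grouping fold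
theorem byKey_getD_gen (items : List (List (String × String)))
    (d : PySem.Dict String (List String)) (c : String) :
    (items.foldl
      (fun d m => d.modify ((PySem.Dict.mk m).getD "key" "") []
        (· ++ [(PySem.Dict.mk m).getD "value" ""])) d).getD c []
    = d.getD c [] ++ List.map Prod.snd (List.filter (fun p => p.1 == c)
        (List.map (fun m => ((PySem.Dict.mk m).getD "key" "", (PySem.Dict.mk m).getD "value" "")) items)) := by
  induction items generalizing d with
  | nil => simp
  | cons m rest ih =>
    simp only [List.foldl_cons, List.map_cons, List.filter_cons, ih]
    by_cases hk : (PySem.Dict.mk m).getD "key" "" = c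
    · simp [hk]
    · simp [hk, PySem.Dict.getD_modify, Ne.symm hk]

theorem byKey_getD (items : List (List (String × String))) (c : String) :
    (items.foldl
      (fun d m => d.modify ((PySem.Dict.mk m).getD "key" "") []
        (· ++ [(PySem.Dict.mk m).getD "value" ""]))
      (PySem.Dict.empty (κ := String) (ν := List String))).getD c []
    = List.map Prod.snd (List.filter (fun p => p.1 == c)
        (List.map (fun m => ((PySem.Dict.mk m).getD "key" "", (PySem.Dict.mk m).getD "value" "")) items)) := by
  rw [byKey_getD_gen]
  simp [PySem.Dict.getD_empty]

-- membership in a grouped list is a one-pass existence test over the items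
theorem byKey_contains (items : List (List (String × String))) (c v : String) :
    (List.map Prod.snd (List.filter (fun p => p.1 == c)
        (List.map (fun m => ((PySem.Dict.mk m).getD "key" "", (PySem.Dict.mk m).getD "value" "")) items))).contains v
    = items.any (fun m => ((PySem.Dict.mk m).getD "key" "" == c) &&
                          ((PySem.Dict.mk m).getD "value" "" == v)) := by
  rw [Bool.eq_iff_iff]
  simp only [List.contains_iff_mem, List.any_eq_true, List.mem_map, List.mem_filter,
    Bool.and_eq_true, beq_iff_eq]
  constructor
  · rintro ⟨b, ⟨⟨m, hm, rfl⟩, hk⟩, hv⟩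
    exact ⟨m, hm, hk, hv⟩
  · rintro ⟨m, hm, hk, hv⟩
    exact ⟨_, ⟨⟨m, hm, rfl⟩, hk⟩, hv⟩

-- A's inner loop is an existence test
theorem hpsAInner_eq_any (items : List (List (String × String))) :
    hpsAInner items = items.any (fun m =>
      decide ((PySem.Dict.mk m).get? "key" = some "_wc_order_attribution_source_type" ∧
              (PySem.Dict.mk m).get? "value" = some "utm")) := by
  induction items with
  | nil => rfl
  | cons m rest ih =>
    unfold hpsAInner
    split_ifs with h <;> simp [h, ih]

-- A's outer loop is (∃ google item) && (inner test)
theorem hpsAOuter_eq (allItems items : List (List (String × String))) :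
    hpsAOuter allItems items =
      (items.any (fun m =>
        decide ((PySem.Dict.mk m).getD "key" "" = "_wc_order_attribution_utm_source" ∧
                (PySem.Dict.mk m).getD "value" "" = "google")) && hpsAInner allItems) := by
  induction items with
  | nil => rfl
  | cons m rest ih =>
    unfold hpsAOuter
    by_cases h : ((PySem.Dict.mk m).getD "key" "" = "_wc_order_attribution_utm_source" ∧
                  (PySem.Dict.mk m).getD "value" "" = "google")
    · cases hI : hpsAInner allItems <;> simp [h, hI, ih]
    · simp [h, ih]
      rcases not_and_or.mp h with h1 | h1 <;> simp [h1]

-- the outer loop's propositional test in `==` form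
theorem outer_pred_eq (m : List (String × String)) :
    decide ((PySem.Dict.mk m).getD "key" "" = "_wc_order_attribution_utm_source" ∧
            (PySem.Dict.mk m).getD "value" "" = "google")
    = (((PySem.Dict.mk m).getD "key" "" == "_wc_order_attribution_utm_source") &&
       ((PySem.Dict.mk m).getD "value" "" == "google")) := by
  by_cases h1 : (PySem.Dict.mk m).getD "key" "" = "_wc_order_attribution_utm_source" <;>
    by_cases h2 : (PySem.Dict.mk m).getD "value" "" = "google" <;> simp [h1, h2]

-- the inner loop's `get? = some s` test agrees with B's `getD "" = s` grouping (s ≠ "")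
theorem inner_pred_eq (m : List (String × String)) :
    decide ((PySem.Dict.mk m).get? "key" = some "_wc_order_attribution_source_type" ∧
            (PySem.Dict.mk m).get? "value" = some "utm")
    = (((PySem.Dict.mk m).getD "key" "" == "_wc_order_attribution_source_type") &&
       ((PySem.Dict.mk m).getD "value" "" == "utm")) := by
  rw [PySem.Dict.getD_eq_get?_getD, PySem.Dict.getD_eq_get?_getD]
  cases hk : (PySem.Dict.mk m).get? "key" <;>
    cases hv : (PySem.Dict.mk m).get? "value" <;>
      simp [beq_eq_decide]

-- ===== VERDICT (by name: the statement is the Claim_ definition above) =====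
theorem has_paid_search_attribution_spec : Claim_equal_has_paid_search_attribution := by
  intro order_data _
  unfold Spec_has_paid_search_attribution has_paid_search_attribution has_paid_search_attribution_alt
  cases h : (PySem.Dict.mk order_data).get? "meta_data" with
  | none => rfl
  | some items =>
    dsimp only
    rw [byKey_getD, byKey_getD, byKey_contains, byKey_contains, hpsAOuter_eq, hpsAInner_eq_any]
    simp only [outer_pred_eq, inner_pred_eq]
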